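-- pv_equiv track=rewrite | github.com/donmahallem/connect_four_tf | src/statemanager2.py | bit_array_to_int
-- ===== SOURCE A (Python) =====
-- def bit_array_to_int(arr):
--     i = 0
--     for bit in arr:
--         k = 0
--         if bit != 0:
--             k = 1 if bit == 1 else 2
--         i = (i << 2) | k
--     return i
-- ===== SOURCE B (Python) =====
-- def bit_array_to_int(arr):
--     total = 0
--     p = 1
--     for bit in reversed(arr):
--         total += (0 if bit == 0 else 1 if bit == 1 else 2) * p
--         p *= 4
--     return total
-- ===== Notes on version B (the rewrite author's own statement) =====
-- stated objective: alternative
-- what changed: B traverses the array back-to-front keeping a running power of 4 and summing digit*weight, instead of A's front-to-back shift-and-or accumulator.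
import Mathlib
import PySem

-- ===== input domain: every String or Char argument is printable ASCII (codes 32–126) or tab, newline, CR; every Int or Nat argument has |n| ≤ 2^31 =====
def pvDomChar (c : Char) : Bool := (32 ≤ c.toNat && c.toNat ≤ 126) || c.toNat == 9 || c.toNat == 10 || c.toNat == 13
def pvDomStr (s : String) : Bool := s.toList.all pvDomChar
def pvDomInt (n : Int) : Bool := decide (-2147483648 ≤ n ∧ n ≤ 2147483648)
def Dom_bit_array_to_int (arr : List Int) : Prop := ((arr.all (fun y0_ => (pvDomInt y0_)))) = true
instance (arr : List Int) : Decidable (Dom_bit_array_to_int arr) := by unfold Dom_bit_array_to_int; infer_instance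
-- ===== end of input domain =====

-- B replaces A's front-to-back shift-and-or accumulator by a back-to-front pass that sums
-- digit * (running power of 4); same O(n) cost, a genuinely different traversal (objective: alternative).

-- ===== PORT A =====
-- literal port of A: i = 0; for bit in arr: k = 0; if bit != 0: k = 1 if bit == 1 else 2; i = (i << 2) | k
def bit_array_to_int (arr : List Int) : Int :=
  arr.foldl (fun i bit =>
    let k : Int := if bit ≠ 0 then (if bit = 1 then 1 else 2) else 0
    PySem.Int.bor (i <<< (2 : Nat)) k) 0

-- ===== PORT B =====
-- literal port of Source B: total = 0; p = 1; for bit in reversed(arr): total += digit*p; p *= 4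
def bit_array_to_int_alt (arr : List Int) : Int :=
  (arr.reverse.foldl (fun (s : Int × Int) bit =>
    (s.1 + (if bit = 0 then 0 else if bit = 1 then 1 else 2) * s.2, s.2 * 4)) (0, 1)).1

-- ===== PRECONDITION & SPEC =====
def Spec_bit_array_to_int (arr : List Int) (out : Int) : Prop := out = bit_array_to_int_alt arr
instance (arr : List Int) (out : Int) : Decidable (Spec_bit_array_to_int arr out) := by unfold Spec_bit_array_to_int; infer_instance

-- ===== CLAIM (what is proved, stated in full; the proofs are below) =====
def Claim_equal_bit_array_to_int : Prop := ∀ (arr : List Int), Dom_bit_array_to_int arr → Spec_bit_array_to_int arr (bit_array_to_int arr)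

-- ===== LEMMAS AND PROOFS =====

-- the base-4 digit both programs assign to an element
def pvDigit (b : Int) : Int := if b = 0 then 0 else if b = 1 then 1 else 2

theorem pvDigit_nonneg (b : Int) : 0 ≤ pvDigit b := by
  unfold pvDigit; split_ifs <;> norm_num

theorem pvDigit_lt (b : Int) : pvDigit b < 4 := by
  unfold pvDigit; split_ifs <;> norm_num

-- big-endian reference value
def pvVal : List Int → Int
  | [] => 0
  | b :: t => pvDigit b * 4 ^ t.length + pvVal t

-- A's step: (i << 2) | k = 4*i + k for nonnegative i and digit k
theorem pv_step_eq (i k : Int) (hi : 0 ≤ i) (hk : 0 ≤ k) (hk4 : k < 4) :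
    PySem.Int.bor (i <<< (2 : Nat)) k = 4 * i + k := by
  have hs : i <<< (2 : Nat) = 4 * i := by rw [Int.shiftLeft_eq]; ring
  rw [hs]
  have h4i : 0 ≤ 4 * i := by omega
  unfold PySem.Int.bor
  rw [if_pos h4i, if_pos hk]
  have ht : (4 * i).toNat = 4 * i.toNat := by omega
  have h2 := Nat.two_pow_add_eq_or_of_lt (i := 2) (b := k.toNat) (by omega) i.toNat
  norm_num at h2
  rw [ht, ← h2]
  omega

-- A's loop invariant
theorem pv_foldA (l : List Int) (acc : Int) (h : 0 ≤ acc) :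
    l.foldl (fun i bit =>
      let k : Int := if bit ≠ 0 then (if bit = 1 then 1 else 2) else 0
      PySem.Int.bor (i <<< (2 : Nat)) k) acc = acc * 4 ^ l.length + pvVal l := by
  induction l generalizing acc with
  | nil => simp [pvVal]
  | cons b t ih =>
      have hk : (if b ≠ 0 then (if b = 1 then 1 else 2) else (0:Int)) = pvDigit b := by
        unfold pvDigit; split_ifs <;> simp_all
      simp only [List.foldl_cons, hk]
      rw [pv_step_eq acc (pvDigit b) h (pvDigit_nonneg b) (pvDigit_lt b)]
      rw [ih _ (by have := pvDigit_nonneg b; omega)]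
      simp only [pvVal, List.length_cons]
      ring

-- little-endian reference value (the order B visits the elements)
def pvRval : List Int → Int
  | [] => 0
  | b :: t => pvDigit b + 4 * pvRval t

-- B's loop invariant
theorem pv_foldB (l : List Int) (s p : Int) :
    l.foldl (fun (s : Int × Int) bit =>
      (s.1 + (if bit = 0 then 0 else if bit = 1 then 1 else 2) * s.2, s.2 * 4)) (s, p)
      = (s + p * pvRval l, p * 4 ^ l.length) := by
  induction l generalizing s p with
  | nil => simp [pvRval]
  | cons b t ih =>
      have hk : (if b = 0 then 0 else if b = 1 then 1 else (2:Int)) = pvDigit b := by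
        unfold pvDigit; split_ifs <;> simp_all
      simp only [List.foldl_cons, hk, ih]
      simp only [pvRval, List.length_cons]
      rw [Prod.mk.injEq]
      constructor <;> ring

theorem pvRval_append (l : List Int) (b : Int) :
    pvRval (l ++ [b]) = pvRval l + pvDigit b * 4 ^ l.length := by
  induction l with
  | nil => simp [pvRval]
  | cons x t ih => simp only [List.cons_append, pvRval, ih, List.length_cons]; ring

theorem pvRval_reverse (l : List Int) : pvRval l.reverse = pvVal l := by
  induction l with
  | nil => rfl
  | cons b t ih =>
      simp only [List.reverse_cons, pvRval_append, ih, pvVal, List.length_reverse]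
      ring

-- ===== VERDICT (by name: the statement is the Claim_ definition above) =====
theorem bit_array_to_int_spec : Claim_equal_bit_array_to_int := by
  intro arr _
  show bit_array_to_int arr = bit_array_to_int_alt arr
  unfold bit_array_to_int bit_array_to_int_alt
  rw [pv_foldA arr 0 le_rfl, pv_foldB arr.reverse 0 1, pvRval_reverse]
  simp
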